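-- pv_equiv track=rewrite | github.com/Sibgat0987/Line_Encoding_And_Modulation | HBD3.PY | hdb3_decode
-- ===== SOURCE A (Python) =====
-- def hdb3_decode(encoded_bits):
--     decoded_bits = []
--     zero_count = 0
--     last_non_zero_level = None
--
--     for i in range(len(encoded_bits)):
--         if encoded_bits[i] == 0:
--             zero_count += 1
--             decoded_bits.append('0')
--         else:
--             if zero_count == 3:
--                 # Detect a substitution pattern of four zeros
--                 if (encoded_bits[i] == last_non_zero_level) or (encoded_bits[i] == -last_non_zero_level):
--                     decoded_bits[-3:] = ['0', '0', '0', '0']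
--                 zero_count = 0
--
--             # Append '1' for non-zero levels and reset the zero count
--             decoded_bits.append('1')
--             last_non_zero_level = encoded_bits[i]
--             zero_count = 0
--
--     return ''.join(decoded_bits)
-- ===== SOURCE B (Python) =====
-- def hdb3_decode(encoded_bits):
--     # Run-based scan: an outer while advances over whole zero-runs found by an
--     # inner zero-scanning while, deciding each run's length (3 vs substituted 4)
--     # at the non-zero mark that terminates it; trailing zeros are emitted when
--     # the inner scan hits the end.
--     out = []
--     last = None
--     n = len(encoded_bits)
--     i = 0
--     while i < n:
--         j = i
--         while j < n and encoded_bits[j] == 0: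
--             j += 1
--         z = j - i
--         if j == n:
--             out.append('0' * z)
--             break
--         x = encoded_bits[j]
--         if z == 3 and (x == last or x == -last):
--             out.append('0000')
--         else:
--             out.append('0' * z)
--         out.append('1')
--         last = x
--         i = j + 1
--     return ''.join(out)
-- ===== Notes on version B (the rewrite author's own statement) =====
-- stated objective: alternative
-- what changed: B is run-based: an outer loop consumes one whole zero-run at a time (found by an inner zero-scan), emits the run (3 zeros or the substituted 4) together with its terminating mark, and flushes trailing zeros at the end, instead of A's per-element loop that appends every zero eagerly and slice-mutates already-emitted output on a violation.
import Mathlib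
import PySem

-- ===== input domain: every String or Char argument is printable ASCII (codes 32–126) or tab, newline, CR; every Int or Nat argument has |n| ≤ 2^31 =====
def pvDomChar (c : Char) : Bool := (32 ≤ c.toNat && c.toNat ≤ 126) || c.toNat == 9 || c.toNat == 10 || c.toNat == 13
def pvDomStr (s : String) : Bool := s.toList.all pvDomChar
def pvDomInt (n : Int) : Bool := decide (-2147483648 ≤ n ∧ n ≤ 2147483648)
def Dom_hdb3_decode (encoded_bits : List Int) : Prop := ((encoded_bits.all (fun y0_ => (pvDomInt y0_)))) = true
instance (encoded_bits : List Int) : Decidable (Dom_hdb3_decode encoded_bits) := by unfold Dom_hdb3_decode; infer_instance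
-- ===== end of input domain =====

-- B decodes run-by-run (one recursive step per zero-run and its terminating mark, trailing
-- zeros flushed at the end) instead of A's per-element loop that slice-mutates emitted output
-- on a violation; same output, same cost (objective: alternative).

-- ===== PORT A =====
-- state: (decoded_bits as chars, zero_count, last_non_zero_level).
-- Where Python A raises TypeError (zero_count = 3 with last_non_zero_level = None),
-- the port's `none` branch yields `false`; such inputs are excluded by Pre_ below.
def hdb3_decode (encoded_bits : List Int) : String :=
  let st := encoded_bits.foldl
    (fun (s : List Char × Nat × Option Int) x =>
      if x = 0 then (s.1 ++ ['0'], s.2.1 + 1, s.2.2)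
      else
        let dec' :=
          if s.2.1 = 3 then
            if (match s.2.2 with | some l => x == l || x == -l | none => false) then
              s.1.take (s.1.length - 3) ++ ['0', '0', '0', '0']   -- decoded_bits[-3:] = ['0','0','0','0']
            else s.1
          else s.1
        (dec' ++ ['1'], 0, some x))
    ([], 0, none)
  String.mk st.1

-- ===== PORT B =====
-- B's violation test `x == last or x == -last` at a run-terminating mark x.
def hdb3_viol (last : Option Int) (x : Int) : Bool :=
  match last with | some l => x == l || x == -l | none => false

-- Outer while-iteration of B: the inner zero-scanning while is `takeWhile`/`dropWhile`
-- (z = j - i is the run's length, the dropped tail resumes at j); one recursive call per run.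
def hdb3_decode_go (last : Option Int) (xs : List Int) : List Char :=
  let z := (xs.takeWhile (· == 0)).length
  match h : xs.dropWhile (· == 0) with
  | [] => List.replicate z '0'                                   -- j == n: flush trailing zeros
  | x :: tail =>
      (if z == 3 && hdb3_viol last x then List.replicate 4 '0' else List.replicate z '0')
      ++ '1' :: hdb3_decode_go (some x) tail
termination_by xs.length
decreasing_by
  have h1 : (xs.dropWhile (· == 0)).length ≤ xs.length := List.length_dropWhile_le _ _
  rw [h] at h1
  simp at h1
  omega

def hdb3_decode_alt (encoded_bits : List Int) : String :=
  String.mk (hdb3_decode_go none encoded_bits)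

-- ===== PRECONDITION & SPEC =====
-- Pre_ excludes exactly the inputs on which Python A raises TypeError: those starting
-- with exactly three zeros followed by a non-zero element (it computes -None there).
def Pre_hdb3_decode (encoded_bits : List Int) : Prop :=
  ¬ (encoded_bits.take 3 = [0, 0, 0] ∧ encoded_bits.getD 3 0 ≠ 0)
instance (encoded_bits : List Int) : Decidable (Pre_hdb3_decode encoded_bits) := by
  unfold Pre_hdb3_decode; infer_instance
def pvWitness_hdb3_decode : List Int := [1, 0, 0, 0, -1]

def Spec_hdb3_decode (encoded_bits : List Int) (out : String) : Prop := out = hdb3_decode_alt encoded_bits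
instance (encoded_bits : List Int) (out : String) : Decidable (Spec_hdb3_decode encoded_bits out) := by unfold Spec_hdb3_decode; infer_instance

-- ===== CLAIM (what is proved, stated in full; the proofs are below) =====
def Claim_equal_hdb3_decode : Prop := ∀ (encoded_bits : List Int), Dom_hdb3_decode encoded_bits → Pre_hdb3_decode encoded_bits → Spec_hdb3_decode encoded_bits (hdb3_decode encoded_bits)

-- ===== LEMMAS AND PROOFS =====

-- A's inline violation match is hdb3_viol.
theorem viol_eq (last : Option Int) (x : Int) :
    (match last with | some l => x == l || x == -l | none => false) = hdb3_viol last x := by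
  cases last <;> rfl

-- Proof-only intermediate: A's loop with deferred zeros (pending count z, not yet emitted).
def hdb3Aux (z : Nat) (last : Option Int) : List Int → List Char
  | [] => List.replicate z '0'
  | x :: rest =>
      if x = 0 then hdb3Aux (z + 1) last rest
      else
        (if z == 3 && hdb3_viol last x then List.replicate 4 '0' else List.replicate z '0')
        ++ '1' :: hdb3Aux 0 (some x) rest

-- A's fold, started with z pending zeros already emitted, produces acc ++ hdb3Aux z last xs.
theorem hdb3A_aux (xs : List Int) : ∀ (acc : List Char) (z : Nat) (last : Option Int),
    (xs.foldl
      (fun (s : List Char × Nat × Option Int) x =>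
        if x = 0 then (s.1 ++ ['0'], s.2.1 + 1, s.2.2)
        else
          let dec' :=
            if s.2.1 = 3 then
              if (match s.2.2 with | some l => x == l || x == -l | none => false) then
                s.1.take (s.1.length - 3) ++ ['0', '0', '0', '0']
              else s.1
            else s.1
          (dec' ++ ['1'], 0, some x))
      (acc ++ List.replicate z '0', z, last)).1
    = acc ++ hdb3Aux z last xs := by
  induction xs with
  | nil => intro acc z last; simp [hdb3Aux]
  | cons x rest ih =>
    intro acc z last
    by_cases hx : x = 0
    · simp only [List.foldl_cons, hx, if_pos rfl, hdb3Aux]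
      have h : (acc ++ List.replicate z '0') ++ ['0'] = acc ++ List.replicate (z + 1) '0' := by
        rw [List.replicate_succ' (n := z)]; simp
      rw [h]
      simpa [hx] using ih acc (z + 1) last
    · simp only [List.foldl_cons, if_neg hx, hdb3Aux, viol_eq]
      by_cases hz : z = 3
      · subst hz
        by_cases hv : hdb3_viol last x = true
        · have htake : (acc ++ List.replicate 3 '0').take
              ((acc ++ List.replicate 3 '0').length - 3) = acc := by simp
          simp only [if_pos rfl, hv, if_pos rfl, htake, Bool.and_true]
          have := ih (acc ++ List.replicate 4 '0' ++ ['1']) 0 (some x)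
          simp only [List.replicate_zero, List.append_nil] at this
          simpa [List.replicate, List.append_assoc] using this
        · simp only [Bool.not_eq_true] at hv
          simp only [hv, Bool.and_false, Bool.false_eq_true, if_false, if_pos rfl]
          have := ih (acc ++ List.replicate 3 '0' ++ ['1']) 0 (some x)
          simp only [List.replicate_zero, List.append_nil] at this
          simpa [List.append_assoc] using this
      · have hzb : ((z == 3) && hdb3_viol last x) = false := by simp [hz]
        simp only [if_neg hz, hzb, if_neg (Bool.false_ne_true)]
        have := ih (acc ++ List.replicate z '0' ++ ['1']) 0 (some x)
        simp only [List.replicate_zero, List.append_nil] at this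
        simpa [List.append_assoc] using this

-- Non-dependent unfolding of hdb3_decode_go (its own match carries the termination proof).
theorem go_unfold (last : Option Int) (xs : List Int) :
    hdb3_decode_go last xs =
      (match xs.dropWhile (· == 0) with
       | [] => List.replicate (xs.takeWhile (· == 0)).length '0'
       | x :: tail =>
          (if (xs.takeWhile (· == 0)).length == 3 && hdb3_viol last x then
            List.replicate 4 '0'
          else List.replicate (xs.takeWhile (· == 0)).length '0')
          ++ '1' :: hdb3_decode_go (some x) tail) := by
  rw [hdb3_decode_go]
  split <;> rename_i heq <;> rw [heq]

-- The deferred loop with z pending zeros equals the run-based recursion, where the pending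
-- zeros join the zero-run at the head of xs.
theorem hdb3Aux_go (xs : List Int) : ∀ (z : Nat) (last : Option Int),
    hdb3Aux z last xs =
      (match xs.dropWhile (· == 0) with
       | [] => List.replicate (z + (xs.takeWhile (· == 0)).length) '0'
       | x :: tail =>
          (if (z + (xs.takeWhile (· == 0)).length) == 3 && hdb3_viol last x then
            List.replicate 4 '0'
          else List.replicate (z + (xs.takeWhile (· == 0)).length) '0')
          ++ '1' :: hdb3_decode_go (some x) tail) := by
  induction xs with
  | nil => intro z last; simp [hdb3Aux]
  | cons x rest ih =>
    intro z last
    by_cases hx : x = 0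
    · have hb : (x == (0:Int)) = true := by simp [hx]
      simp only [hdb3Aux, hx, if_pos rfl, List.takeWhile_cons, List.dropWhile_cons, hb,
        if_pos rfl, List.length_cons]
      rw [ih (z + 1) last]
      have harr : ∀ k, z + 1 + k = z + (k + 1) := by omega
      cases hdw : rest.dropWhile (· == 0) with
      | nil => simp [hdw, harr]
      | cons y tail => simp [hdw, harr]
    · have hb : (x == (0:Int)) = false := by simp [hx]
      simp only [hdb3Aux, if_neg hx, List.takeWhile_cons, List.dropWhile_cons, hb,
        Bool.false_eq_true, if_neg (by simp : ¬ False), List.length_nil, Nat.add_zero]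
      have hsuf : hdb3Aux 0 (some x) rest = hdb3_decode_go (some x) rest := by
        rw [ih 0 (some x), go_unfold]
        cases hdw : rest.dropWhile (· == 0) with
        | nil => simp [hdw]
        | cons y tail => simp [hdw]
      rw [hsuf]

-- At z = 0 the two sides are exactly hdb3Aux 0 and hdb3_decode_go.
theorem hdb3Aux_eq_go (last : Option Int) (xs : List Int) :
    hdb3Aux 0 last xs = hdb3_decode_go last xs := by
  rw [hdb3Aux_go xs 0 last, go_unfold]
  cases hdw : xs.dropWhile (· == 0) with
  | nil => simp [hdw]
  | cons y tail => simp [hdw]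

-- ===== VERDICT (by name: the statement is the Claim_ definition above) =====
theorem hdb3_decode_spec : Claim_equal_hdb3_decode := by
  intro ebs _ _
  unfold Spec_hdb3_decode hdb3_decode_alt
  show String.mk ((ebs.foldl
      (fun (s : List Char × Nat × Option Int) x =>
        if x = 0 then (s.1 ++ ['0'], s.2.1 + 1, s.2.2)
        else
          ((if s.2.1 = 3 then
              if (match s.2.2 with | some l => x == l || x == -l | none => false) then
                s.1.take (s.1.length - 3) ++ ['0', '0', '0', '0']
              else s.1
            else s.1) ++ ['1'], 0, some x))
      ([], 0, none)).1)
    = String.mk (hdb3_decode_go none ebs)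
  have hA := hdb3A_aux ebs [] 0 none
  simp only [List.replicate_zero, List.append_nil, List.nil_append] at hA
  rw [hA, hdb3Aux_eq_go]
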